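-- pv_equiv track=rewrite | github.com/Unarmed1000/VulkanWillemsExpander | VulkanWillemsExpander/VulkanWillemsExpander.py | DetermineIndentString
-- ===== SOURCE A (Python) =====
-- def IndexOfNonWhitepace(source, startIndex):
--     for i in range(startIndex, len(source)):
--         if source[i] != ' ' and source[i] != '\t' and source[i] != '\r' and source[i] != '\n':
--             return i
--     return -1
--
-- def DetermineIndentString(source, startIndex):
--     index = 0
--     for i in reversed(range(0, startIndex)):
--         if source[i] == '\r' or source[i] == '\n':
--             index = i+1
--             break
--     endIndex = IndexOfNonWhitepace(source, index)
--     if endIndex < 0: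
--         raise Exception("Not found");
--     return source[index:endIndex];
-- ===== SOURCE B (Python) =====
-- def DetermineIndentString(source, startIndex):
--     # Single forward pass over the whole string with an accumulator:
--     # track the current line start (last newline before startIndex, +1) and the
--     # first non-whitespace position at or after it, updating both as we go.
--     index = 0
--     end = None
--     for pos, ch in enumerate(source):
--         if ch == '\r' or ch == '\n':
--             if pos < startIndex:
--                 index = pos + 1
--                 end = None
--         elif ch != ' ' and ch != '\t':
--             if end is None:
--                 end = pos
--     if end is None:
--         raise Exception("Not found")
--     return source[index:end]
-- ===== Notes on version B (the rewrite author's own statement) =====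
-- stated objective: alternative
-- what changed: Replaced A's two staged directional scans (a backward scan from startIndex for the previous newline, then the IndexOfNonWhitepace forward scan from that line start) by one single left-to-right pass over the whole string with an accumulator (line start, first non-whitespace position) that is reset at each newline before startIndex.
import Mathlib
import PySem

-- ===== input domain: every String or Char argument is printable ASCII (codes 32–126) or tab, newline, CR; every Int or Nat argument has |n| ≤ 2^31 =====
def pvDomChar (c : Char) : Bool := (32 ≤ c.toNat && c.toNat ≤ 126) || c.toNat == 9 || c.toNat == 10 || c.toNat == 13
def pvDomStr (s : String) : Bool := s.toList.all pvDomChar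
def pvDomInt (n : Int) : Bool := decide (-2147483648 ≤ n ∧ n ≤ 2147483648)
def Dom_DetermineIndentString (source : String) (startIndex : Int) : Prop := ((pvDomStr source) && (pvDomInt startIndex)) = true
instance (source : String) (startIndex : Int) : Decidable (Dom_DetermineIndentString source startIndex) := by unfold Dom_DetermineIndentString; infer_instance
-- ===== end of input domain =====

-- B replaces A's two staged directional scans (backward newline scan, then the IndexOfNonWhitepace
-- forward scan) by ONE single left-to-right pass over the whole string with an accumulator
-- (line start, first non-whitespace position) reset at each newline before startIndex
-- (objective: alternative, no speed claim); equal wherever the Python A returns normally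
-- (Pre_ excludes exactly the inputs where A raises; B raises there too except startIndex > len).


-- ===== PORT A =====
-- the loop of IndexOfNonWhitepace: first index i in the range list with a non-whitespace char, else -1
def idxNonWsGo (cs : List Char) : List Int → Int
  | [] => -1
  | i :: rest =>
      let c := PySem.List.pyGetD cs i ' '   -- in range on every call made below
      if c ≠ ' ' ∧ c ≠ '\t' ∧ c ≠ '\r' ∧ c ≠ '\n' then i else idxNonWsGo cs rest

def IndexOfNonWhitepace (source : String) (startIndex : Int) : Int :=
  idxNonWsGo source.toList (PySem.List.pyRange startIndex (source.toList.length : Int) 1)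

-- the backward loop of DetermineIndentString: first i (descending) with source[i] a newline gives i+1, else 0
def lineStartGo (cs : List Char) : List Int → Int
  | [] => 0
  | i :: rest =>
      let c := PySem.List.pyGetD cs i ' '   -- in range on every input Pre_ admits
      if c = '\r' ∨ c = '\n' then i + 1 else lineStartGo cs rest

def DetermineIndentString (source : String) (startIndex : Int) : String :=
  let index := lineStartGo source.toList (PySem.List.pyRange 0 startIndex 1).reverse
  let endIndex := IndexOfNonWhitepace source index
  if endIndex < 0 then ""   -- Python raises Exception "Not found" here; excluded by Pre_
  else String.ofList (PySem.List.slice source.toList (some index) (some endIndex))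

-- ===== PORT B =====
-- one step of B's single forward pass: state = (index = current line start, end = first non-ws ≥ index)
def stepB (sI : Int) (st : Int × Option Int) (pc : Int × Char) : Int × Option Int :=
  if pc.2 = '\r' ∨ pc.2 = '\n' then
    (if pc.1 < sI then (pc.1 + 1, none) else st)
  else if pc.2 ≠ ' ' ∧ pc.2 ≠ '\t' then
    (match st.2 with
     | none => (st.1, some pc.1)
     | some _ => st)
  else st

def DetermineIndentString_alt (source : String) (startIndex : Int) : String :=
  let st := (PySem.List.enumerate source.toList 0).foldl (stepB startIndex) (0, none)
  match st.2 with
  | none => ""   -- Python raises Exception "Not found" here; excluded by Pre_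
  | some e => String.ofList (PySem.List.slice source.toList (some st.1) (some e))

-- ===== PRECONDITION & SPEC =====
def pvIsWs (c : Char) : Bool := c == ' ' || c == '\t' || c == '\r' || c == '\n'

-- Pre_ excludes exactly the inputs where the Python A raises: startIndex > len(source)
-- (IndexError in the backward loop) and inputs whose current line — from the last CR/LF before
-- startIndex on — is all whitespace (A's explicit raise Exception "Not found"; B raises there too).
def Pre_DetermineIndentString (source : String) (startIndex : Int) : Prop :=
  startIndex ≤ (source.toList.length : Int) ∧
  ∃ j < source.toList.length, pvIsWs (source.toList.getD j ' ') = false ∧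
    ∀ p < source.toList.length, j ≤ p → (p : Int) < startIndex →
      source.toList.getD p ' ' ≠ '\r' ∧ source.toList.getD p ' ' ≠ '\n'
instance (source : String) (startIndex : Int) : Decidable (Pre_DetermineIndentString source startIndex) := by
  unfold Pre_DetermineIndentString; infer_instance

def pvWitness_DetermineIndentString : String × Int := ("a\n  x", 3)

def Spec_DetermineIndentString (source : String) (startIndex : Int) (out : String) : Prop := out = DetermineIndentString_alt source startIndex
instance (source : String) (startIndex : Int) (out : String) : Decidable (Spec_DetermineIndentString source startIndex out) := by unfold Spec_DetermineIndentString; infer_instance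

-- ===== CLAIM (what is proved, stated in full; the proofs are below) =====
def Claim_equal_DetermineIndentString : Prop := ∀ (source : String) (startIndex : Int), Dom_DetermineIndentString source startIndex → Pre_DetermineIndentString source startIndex → Spec_DetermineIndentString source startIndex (DetermineIndentString source startIndex)

-- ===== LEMMAS AND PROOFS =====

-- last newline strictly below m, as in A's backward scan: lastNL cs m = that position, or -1
def lastNL (cs : List Char) : Nat → Int
  | 0 => -1
  | m+1 => if cs[m]? = some '\r' ∨ cs[m]? = some '\n' then (m : Int) else lastNL cs m

-- B's running line start after processing the first k characters
def lastNLB (cs : List Char) (sI : Int) : Nat → Int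
  | 0 => 0
  | k+1 => if (cs.getD k ' ' = '\r' ∨ cs.getD k ' ' = '\n') ∧ (k : Int) < sI then (k : Int) + 1
           else lastNLB cs sI k

-- first non-whitespace position in [a, b), as an Option
def firstNW (cs : List Char) (a b : Int) : Option Int :=
  (PySem.List.pyRange a b 1).find? (fun j => !pvIsWs (PySem.List.pyGetD cs j ' '))

theorem lastNL_bounds (cs : List Char) (m : Nat) : -1 ≤ lastNL cs m ∧ lastNL cs m < m := by
  induction m with
  | zero => simp [lastNL]
  | succ m ih => simp only [lastNL]; split <;> omega

theorem lastNLB_bounds (cs : List Char) (sI : Int) (k : Nat) :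
    0 ≤ lastNLB cs sI k ∧ lastNLB cs sI k ≤ k := by
  induction k with
  | zero => simp [lastNLB]
  | succ k ih => simp only [lastNLB]; split <;> omega

theorem pvIsWs_false_iff (c : Char) :
    (c ≠ ' ' ∧ c ≠ '\t' ∧ c ≠ '\r' ∧ c ≠ '\n') ↔ pvIsWs c = false := by
  simp [pvIsWs]; tauto

theorem pyRange_zero_eq (b : Int) :
    PySem.List.pyRange 0 b 1 = (List.range b.toNat).map (fun k => (k : Int)) := by
  simp only [PySem.List.pyRange]
  norm_num
  have h : (if 0 < b then b.toNat else 0) = b.toNat := by split <;> omega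
  rw [h]
  exact List.map_eq_flatMap

theorem lineStartGo_eq (cs : List Char) (m : Nat) (hm : m ≤ cs.length) :
    lineStartGo cs (((List.range m).map (fun k => (k : Int))).reverse) = lastNL cs m + 1 := by
  induction m with
  | zero =>
    simp only [List.range_zero]
    rfl
  | succ m ih =>
    rw [List.range_succ]
    rw [show (((List.range m ++ [m]).map (fun k => (k : Int))).reverse)
          = (m : Int) :: ((List.range m).map (fun k => (k : Int))).reverse by simp]
    rw [lineStartGo]
    have hget : PySem.List.pyGetD cs (m : Int) ' ' = cs.getD m ' ' := by
      simp [PySem.List.pyGetD_natCast]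
    have hm' : m < cs.length := by omega
    simp only [hget, lastNL]
    have : cs.getD m ' ' = cs[m] := by simp [List.getD, List.getElem?_eq_getElem hm']
    rw [this]
    have h2 : cs[m]? = some cs[m] := List.getElem?_eq_getElem hm'
    by_cases h : cs[m] = '\r' ∨ cs[m] = '\n'
    · rw [if_pos h, if_pos (by simp [h2]; tauto)]
    · rw [if_neg h, if_neg (by simp [h2]; tauto), ih (by omega)]

-- the first scan of A, on any index list, is a find?
theorem idxGo_find (cs : List Char) (l : List Int) :
    idxNonWsGo cs l = (l.find? (fun j => !pvIsWs (PySem.List.pyGetD cs j ' '))).getD (-1) := by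
  induction l with
  | nil => rfl
  | cons i rest ih =>
    simp only [idxNonWsGo, List.find?]
    by_cases h : pvIsWs (PySem.List.pyGetD cs i ' ') = false
    · rw [if_pos ((pvIsWs_false_iff _).mpr h), h]
      simp
    · have h' : pvIsWs (PySem.List.pyGetD cs i ' ') = true := by simp_all
      rw [if_neg (fun hc => by simp [(pvIsWs_false_iff _).mp hc] at h'), h']
      simpa using ih

theorem firstNW_empty (cs : List Char) (a : Int) : firstNW cs a a = none := by
  simp [firstNW, PySem.List.pyRange_one_eq_nil le_rfl]

theorem firstNW_succ (cs : List Char) (a : Int) (k : Nat) (hak : a ≤ (k : Int)) :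
    firstNW cs a ((k : Int) + 1)
      = ((firstNW cs a (k : Int)).or
          (if pvIsWs (PySem.List.pyGetD cs (k : Int) ' ') then none else some (k : Int))) := by
  unfold firstNW
  rw [PySem.List.pyRange_one_succ_right hak, List.find?_append]
  congr 1
  obtain ⟨c, hc⟩ : ∃ c, PySem.List.pyGetD cs (k : Int) ' ' = c := ⟨_, rfl⟩
  rw [hc]
  cases h : pvIsWs c <;> simp [List.find?, hc, h]

theorem mem_of_firstNW (cs : List Char) (a b e : Int) (h : firstNW cs a b = some e) :
    a ≤ e ∧ e < b := by
  have := List.mem_of_find?_eq_some h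
  rwa [PySem.List.mem_pyRange_one] at this

-- taking one more enumerated character
theorem enumerate_take_succ (cs : List Char) (k : Nat) (hk : k < cs.length) :
    (PySem.List.enumerate cs 0).take (k+1)
      = (PySem.List.enumerate cs 0).take k ++ [((k : Int), cs[k])] := by
  rw [List.take_succ]
  simp [PySem.List.getElem?_enumerate, List.getElem?_eq_getElem hk]

-- the invariant of B's single pass
theorem foldB_take (cs : List Char) (sI : Int) (k : Nat) (hk : k ≤ cs.length) :
    ((PySem.List.enumerate cs 0).take k).foldl (stepB sI) (0, none)
      = (lastNLB cs sI k, firstNW cs (lastNLB cs sI k) (k : Int)) := by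
  induction k with
  | zero => simp [lastNLB, firstNW_empty]
  | succ k ih =>
    have hk' : k < cs.length := by omega
    rw [enumerate_take_succ cs k hk', List.foldl_append, ih (by omega)]
    have hget : cs.getD k ' ' = cs[k] := List.getD_eq_getElem cs ' ' hk'
    have hgetD : PySem.List.pyGetD cs (k : Int) ' ' = cs[k] := by
      rw [PySem.List.pyGetD_natCast, hget]
    have hb := lastNLB_bounds cs sI k
    have hcast : (((k+1 : Nat)) : Int) = (k : Int) + 1 := by push_cast; ring
    simp only [List.foldl_cons, List.foldl_nil]
    by_cases hnl : cs[k] = '\r' ∨ cs[k] = '\n'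
    · by_cases hlt : (k : Int) < sI
      · have hL : lastNLB cs sI (k+1) = (k : Int) + 1 := by
          simp only [lastNLB]; rw [if_pos ⟨by rwa [hget], hlt⟩]
        rw [hL, hcast]
        simp only [stepB]
        rw [if_pos hnl, if_pos hlt, firstNW_empty]
      · have hL : lastNLB cs sI (k+1) = lastNLB cs sI k := by
          simp only [lastNLB]; rw [if_neg (by rintro ⟨-, h⟩; exact hlt h)]
        have hws : pvIsWs (PySem.List.pyGetD cs (k : Int) ' ') = true := by
          rw [hgetD]; rcases hnl with h | h <;> simp [pvIsWs, h]
        rw [hL, hcast, firstNW_succ cs _ k hb.2, hws]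
        simp only [stepB]
        rw [if_pos hnl, if_neg hlt]
        simp
    · have hL : lastNLB cs sI (k+1) = lastNLB cs sI k := by
        simp only [lastNLB]; rw [if_neg (by rintro ⟨h, -⟩; exact hnl (by rwa [hget] at h))]
      rw [not_or] at hnl
      rw [hL, hcast, firstNW_succ cs _ k hb.2]
      simp only [stepB]
      rw [if_neg (by tauto)]
      by_cases hsp : cs[k] ≠ ' ' ∧ cs[k] ≠ '\t'
      · have hws : pvIsWs (PySem.List.pyGetD cs (k : Int) ' ') = false := by
          rw [hgetD]; exact (pvIsWs_false_iff _).mp ⟨hsp.1, hsp.2, hnl.1, hnl.2⟩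
        rw [if_pos hsp, hws]
        cases hE : firstNW cs (lastNLB cs sI k) (k : Int) <;> simp
      · have hws : pvIsWs (PySem.List.pyGetD cs (k : Int) ' ') = true := by
          rw [hgetD]
          rcases (not_and_or.mp hsp) with h | h <;>
            · rw [not_not] at h; simp [pvIsWs, h]
        rw [if_neg hsp, hws]
        simp

theorem lastNLB_stable (cs : List Char) (sI : Int) (m : Nat) (hm : sI ≤ (m : Int)) :
    ∀ d, lastNLB cs sI (m + d) = lastNLB cs sI m := by
  intro d
  induction d with
  | zero => rfl
  | succ d ih =>
    rw [show m + (d+1) = (m + d) + 1 by omega]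
    simp only [lastNLB]
    rw [if_neg (by rintro ⟨-, hlt⟩; omega), ih]

theorem lastNLB_eq_lastNL (cs : List Char) (sI : Int) :
    ∀ (k : Nat), (k : Int) ≤ sI → lastNLB cs sI k = lastNL cs k + 1 := by
  intro k
  induction k with
  | zero => intro _; simp [lastNLB, lastNL]
  | succ k ih =>
    intro hk
    have hk1 : ((k+1 : Nat) : Int) = (k : Int) + 1 := by push_cast; ring
    simp only [lastNLB, lastNL]
    by_cases hin : k < cs.length
    · have hget : cs.getD k ' ' = cs[k] := List.getD_eq_getElem cs ' ' hin
      have h2 : cs[k]? = some cs[k] := List.getElem?_eq_getElem hin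
      by_cases hnl : cs[k] = '\r' ∨ cs[k] = '\n'
      · rw [if_pos ⟨by rwa [hget], by rw [hk1] at hk; omega⟩, if_pos (by simp [h2]; tauto)]
      · rw [if_neg (by rw [hget]; tauto), if_neg (by simp [h2]; tauto), ih (by rw [hk1] at hk; omega)]
    · have h2 : cs[k]? = none := List.getElem?_eq_none_iff.mpr (by omega)
      have hget : cs.getD k ' ' = ' ' := by simp [List.getD, h2]
      rw [if_neg (by rw [hget]; rintro ⟨h | h, -⟩ <;> simp at h),
          if_neg (by simp [h2]), ih (by rw [hk1] at hk; omega)]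

theorem ports_agree (source : String) (startIndex : Int)
    (hle : startIndex ≤ (source.toList.length : Int)) :
    DetermineIndentString source startIndex = DetermineIndentString_alt source startIndex := by
  set cs := source.toList with hcs
  set m : Nat := startIndex.toNat with hmdef
  have hm : m ≤ cs.length := by omega
  -- A's line start
  have hA : lineStartGo cs (PySem.List.pyRange 0 startIndex 1).reverse = lastNL cs m + 1 := by
    rw [pyRange_zero_eq, lineStartGo_eq _ _ hm]
  -- B's final state via the invariant
  have hfold : (PySem.List.enumerate cs 0).foldl (stepB startIndex) (0, none)
      = (lastNLB cs startIndex cs.length,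
         firstNW cs (lastNLB cs startIndex cs.length) (cs.length : Int)) := by
    rw [show (PySem.List.enumerate cs 0)
          = (PySem.List.enumerate cs 0).take cs.length by
        rw [List.take_of_length_le]; rw [PySem.List.length_enumerate]]
    exact foldB_take cs startIndex cs.length le_rfl
  -- the two line starts agree
  have hmsI : startIndex ≤ (m : Int) := by omega
  have hLB : lastNLB cs startIndex cs.length = lastNL cs m + 1 := by
    rw [show cs.length = m + (cs.length - m) by omega, lastNLB_stable cs startIndex m hmsI]
    by_cases h0 : 0 ≤ startIndex
    · exact lastNLB_eq_lastNL cs startIndex m (by omega)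
    · have : m = 0 := by omega
      rw [this]; simp [lastNLB, lastNL]
  have hNLb := lastNL_bounds cs m
  set I : Int := lastNL cs m + 1 with hI
  -- A's forward scan is the same find?
  have hscan : IndexOfNonWhitepace source I = (firstNW cs I (cs.length : Int)).getD (-1) := by
    unfold IndexOfNonWhitepace
    rw [← hcs, idxGo_find]
    rfl
  unfold DetermineIndentString DetermineIndentString_alt
  rw [← hcs, hA, hfold, hLB]
  show (if IndexOfNonWhitepace source I < 0 then ""
        else String.ofList (PySem.List.slice cs (some I) (some (IndexOfNonWhitepace source I))))
      = (match firstNW cs I ((cs.length : Nat) : Int) with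
         | none => ""
         | some e => String.ofList (PySem.List.slice cs (some I) (some e)))
  rw [hscan]
  cases hE : firstNW cs I (cs.length : Int) with
  | none => simp
  | some e =>
    have hme := mem_of_firstNW cs I (cs.length : Int) e hE
    have he0 : ¬ (e < 0) := by omega
    simp [he0]

-- ===== VERDICT (by name: the statement is the Claim_ definition above) =====
theorem DetermineIndentString_spec : Claim_equal_DetermineIndentString := by
  intro source startIndex hDom hPre
  unfold Spec_DetermineIndentString
  exact ports_agree source startIndex hPre.1
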